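-- pv_equiv track=rewrite | github.com/mreishus/aoc | 2017/10/python_day10/day10.py | densify
-- ===== SOURCE A (Python) =====
-- from functools import reduce
--
-- def densify(nums):
--     i = 0
--     output = []
--     while i < len(nums):
--         this_section = nums[i : i + 16]
--         this_answer = reduce((lambda x, y: x ^ y), this_section)
--         output.append(this_answer)
--         i += 16
--     return output
-- ===== SOURCE B (Python) =====
-- def densify(nums):
--     output = []
--     acc = 0
--     cnt = 0
--     for x in nums:
--         acc ^= x
--         cnt += 1
--         if cnt == 16:
--             output.append(acc)
--             acc = 0
--             cnt = 0
--     if cnt > 0: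
--         output.append(acc)
--     return output
-- ===== Notes on version B (the rewrite author's own statement) =====
-- stated objective: simpler
-- what changed: Replaces the index-stepping while loop with repeated slicing and functools.reduce by a single pass that XORs into a running accumulator and emits it every 16 elements, flushing the trailing partial block.
import Mathlib
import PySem

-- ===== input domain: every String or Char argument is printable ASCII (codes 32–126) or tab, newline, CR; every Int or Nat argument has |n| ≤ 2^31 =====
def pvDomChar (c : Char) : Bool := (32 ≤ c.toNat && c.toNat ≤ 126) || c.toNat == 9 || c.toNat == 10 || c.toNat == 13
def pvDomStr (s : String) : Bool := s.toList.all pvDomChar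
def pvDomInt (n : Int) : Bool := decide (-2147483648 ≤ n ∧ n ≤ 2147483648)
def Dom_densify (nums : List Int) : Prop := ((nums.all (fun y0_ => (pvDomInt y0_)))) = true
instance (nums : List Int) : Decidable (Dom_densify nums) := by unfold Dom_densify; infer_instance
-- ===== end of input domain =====

-- B replaces the slice-and-reduce while loop by a single pass with a running XOR accumulator (simpler, same cost).


-- ===== PORT A =====
-- while i < len(nums): this_section = nums[i:i+16]; this_answer = reduce(^, this_section); output.append; i += 16
-- (reduce on a nonempty list = fold of the tail starting from the head; the [] arm is unreachable since i < len(nums))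
def densifyGo (nums : List Int) (i : Nat) : List Int :=
  if _h : i < nums.length then
    let this_section := PySem.List.slice nums (some (i : Int)) (some ((i : Int) + 16))
    let this_answer := match this_section with
      | [] => 0
      | h :: t => t.foldl PySem.Int.bxor h
    this_answer :: densifyGo nums (i + 16)
  else []
termination_by nums.length - i

def densify (nums : List Int) : List Int := densifyGo nums 0

-- ===== PORT B =====
def densifyStep (s : List Int × Int × Int) (x : Int) : List Int × Int × Int :=
  let (out, acc, cnt) := s
  let acc := PySem.Int.bxor acc x
  let cnt := cnt + 1
  if cnt = 16 then (out ++ [acc], 0, 0) else (out, acc, cnt)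

def densify_alt (nums : List Int) : List Int :=
  let s := nums.foldl densifyStep ([], 0, 0)
  if s.2.2 > 0 then s.1 ++ [s.2.1] else s.1

-- ===== PRECONDITION & SPEC =====
def Spec_densify (nums : List Int) (out : List Int) : Prop := out = densify_alt nums
instance (nums : List Int) (out : List Int) : Decidable (Spec_densify nums out) := by unfold Spec_densify; infer_instance

-- ===== CLAIM (what is proved, stated in full; the proofs are below) =====
def Claim_equal_densify : Prop := ∀ (nums : List Int), Dom_densify nums → Spec_densify nums (densify nums)

-- ===== LEMMAS AND PROOFS =====

-- a chunked recursion both ports reduce to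
def chunkA : List Int → List Int
  | [] => []
  | h :: t => (t.take 15).foldl PySem.Int.bxor h :: chunkA (t.drop 15)
termination_by l => l.length
decreasing_by simp

theorem chunkA_nil : chunkA [] = [] := by rw [chunkA]

theorem chunkA_cons (h : Int) (t : List Int) :
    chunkA (h :: t) = (t.take 15).foldl PySem.Int.bxor h :: chunkA (t.drop 15) := by
  rw [chunkA]

theorem densifyGo_eq_chunkA (nums : List Int) (i : Nat) :
    densifyGo nums i = chunkA (nums.drop i) := by
  by_cases h : i < nums.length
  · have hd : nums.drop i ≠ [] := by
      intro he
      have := List.length_drop (l := nums) (i := i)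
      rw [he] at this
      simp at this
      omega
    obtain ⟨a, t, ht⟩ := List.exists_cons_of_ne_nil hd
    have hslice : PySem.List.slice nums (some (i : Int)) (some ((i : Int) + 16))
        = (nums.drop i).take 16 := by
      have := PySem.List.slice_natCast_add (xs := nums) (j := i) (n := 16)
      simpa using this
    rw [densifyGo]
    simp only [h, dif_pos]
    rw [hslice, ht]
    have hrec : densifyGo nums (i + 16) = chunkA (nums.drop (i + 16)) :=
      densifyGo_eq_chunkA nums (i + 16)
    have hdrop : nums.drop (i + 16) = t.drop 15 := by
      have h2 : (nums.drop i).drop 16 = nums.drop (i + 16) := by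
        rw [List.drop_drop, Nat.add_comm]
      rw [← h2, ht]; rfl
    have htk : List.take 16 (a :: t) = a :: List.take 15 t := rfl
    rw [hrec, hdrop, chunkA_cons, htk]
  · have hd : nums.drop i = [] := List.drop_eq_nil_of_le (by omega)
    rw [densifyGo]
    simp [h, hd, chunkA_nil]
termination_by nums.length - i

-- B's fold consumes a full block: the accumulator is flushed and the state resets
theorem foldB (block : List Int) (out : List Int) (acc : Int) (cnt : Int)
    (hne : block ≠ []) (hc : cnt + block.length = 16) :
    List.foldl densifyStep (out, acc, cnt) block
      = (out ++ [block.foldl PySem.Int.bxor acc], 0, 0) := by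
  induction block generalizing out acc cnt with
  | nil => exact absurd rfl hne
  | cons x rest ih =>
    cases rest with
    | nil =>
      simp at hc
      simp [densifyStep, hc]
    | cons y t =>
      have hlen : ((y :: t : List Int)).length ≥ 1 := by simp
      have hne16 : ¬ (cnt + 1 = 16) := by
        simp at hc; omega
      simp only [List.foldl_cons, densifyStep]
      rw [if_neg hne16]
      exact ih _ _ _ (by simp) (by simp at hc ⊢; omega)

-- B's fold over a partial block just accumulates
theorem foldBpart (block : List Int) (out : List Int) (acc : Int) (cnt : Int)
    (hc : cnt + block.length < 16) (hc0 : 0 ≤ cnt) :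
    List.foldl densifyStep (out, acc, cnt) block
      = (out, block.foldl PySem.Int.bxor acc, cnt + block.length) := by
  induction block generalizing out acc cnt with
  | nil => simp
  | cons x rest ih =>
    have hne16 : ¬ (cnt + 1 = 16) := by simp at hc; omega
    simp only [List.foldl_cons, densifyStep]
    rw [if_neg hne16]
    rw [ih _ _ _ (by simp at hc ⊢; omega) (by omega)]
    simp; omega

theorem bxor_zero_left (a : Int) : PySem.Int.bxor 0 a = a := by
  rw [PySem.Int.bxor_comm, PySem.Int.bxor_zero]

theorem B_loop_eq_chunkA (l : List Int) (out : List Int) :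
    (let s := List.foldl densifyStep (out, 0, 0) l;
     if s.2.2 > 0 then s.1 ++ [s.2.1] else s.1) = out ++ chunkA l := by
  by_cases h16 : 16 ≤ l.length
  · obtain ⟨a, t, ht⟩ := List.exists_cons_of_ne_nil (l := l)
      (by intro he; rw [he] at h16; simp at h16)
    have hsplit : l = l.take 16 ++ l.drop 16 := (List.take_append_drop 16 l).symm
    have hstep : List.foldl densifyStep (out, (0:Int), (0:Int)) l
        = List.foldl densifyStep
            (out ++ [(l.take 16).foldl PySem.Int.bxor 0], 0, 0) (l.drop 16) := by
      conv_lhs => rw [hsplit]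
      rw [List.foldl_append]
      rw [foldB (l.take 16) out 0 0
        (List.ne_nil_of_length_pos (by rw [List.length_take]; omega))
        (by rw [List.length_take]; omega)]
    have ih := B_loop_eq_chunkA (l.drop 16) (out ++ [(l.take 16).foldl PySem.Int.bxor 0])
    simp only at ih ⊢
    rw [hstep, ih]
    have htake : l.take 16 = a :: t.take 15 := by rw [ht]; simp [List.take_succ_cons]
    have hdrop : l.drop 16 = t.drop 15 := by rw [ht]; simp
    rw [htake, hdrop, ht, chunkA_cons]
    simp [bxor_zero_left]
  · cases l with
    | nil => simp [chunkA_nil]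
    | cons a t =>
      have hlt : (0:Int) + ((a :: t : List Int)).length < 16 := by
        simp at h16; simp; omega
      simp only
      rw [foldBpart _ _ _ _ hlt (by omega)]
      have hpos : (0:Int) + ((a :: t : List Int)).length > 0 := by
        simp
      simp only [hpos, if_pos]
      have htake : t.take 15 = t := List.take_of_length_le (by simp at h16; omega)
      have hdrop : t.drop 15 = [] := List.drop_eq_nil_of_le (by simp at h16; omega)
      rw [chunkA_cons, htake, hdrop, chunkA_nil]
      simp [bxor_zero_left]
termination_by l.length
decreasing_by simp; omega

-- ===== VERDICT (by name: the statement is the Claim_ definition above) =====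
theorem densify_spec : Claim_equal_densify := by
  intro nums _
  unfold Spec_densify densify densify_alt
  rw [densifyGo_eq_chunkA]
  simpa using (B_loop_eq_chunkA nums []).symm
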